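-- pv_equiv track=rewrite | github.com/BiologyHazard/leetcode | 6078-rearrange-characters-to-make-target-string.py | rearrangeCharacters
-- ===== SOURCE A (Python) =====
-- def rearrangeCharacters(s: str, target: str) -> int:
--     l = list(s)
--     ans = 0
--     flag = True
--     while flag:
--         for char in target:
--             if char in l:
--                 l.remove(char)
--             else:
--                 flag = False
--                 break
--         if flag:
--             ans += 1
--     return ans
-- ===== SOURCE B (Python) =====
-- def rearrangeCharacters(s: str, target: str) -> int:
--     return min(s.count(c) // target.count(c) for c in set(target))
-- ===== Notes on version B (the rewrite author's own statement) =====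
-- stated objective: simpler
-- what changed: The simulate-and-consume while-loop over a shrinking character list is replaced by one min over per-character floor-divisions of frequency counts.
import Mathlib
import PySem

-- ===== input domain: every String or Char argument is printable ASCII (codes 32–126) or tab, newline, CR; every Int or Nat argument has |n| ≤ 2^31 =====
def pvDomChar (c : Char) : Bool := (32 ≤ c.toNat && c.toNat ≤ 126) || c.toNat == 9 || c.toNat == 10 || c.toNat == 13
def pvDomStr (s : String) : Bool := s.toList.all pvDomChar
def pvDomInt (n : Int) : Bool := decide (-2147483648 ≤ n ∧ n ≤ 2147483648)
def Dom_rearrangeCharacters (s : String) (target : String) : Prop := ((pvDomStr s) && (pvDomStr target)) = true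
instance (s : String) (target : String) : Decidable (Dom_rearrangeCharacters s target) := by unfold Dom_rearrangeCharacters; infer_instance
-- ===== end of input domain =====

-- B replaces A's simulate-and-consume while-loop by a single min over per-character
-- floor-divisions of frequency counts (objective: simpler).


-- ===== PORT A =====
-- One execution of A's inner `for char in target:` loop: for each char, if present remove
-- its first occurrence (Python list.remove of a present element = List.erase, exact);
-- `none` is the `flag = False; break` exit.
def pvPassA (l : List Char) : List Char → Option (List Char)
  | [] => some l
  | c :: rest => if l.contains c then pvPassA (l.erase c) rest else none

-- A's `while flag:` loop. `fuel` only makes the recursion total: on Pre_ (target ≠ "")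
-- every successful pass removes ≥ 1 element of l, so fuel = |s| + 1 is never exhausted.
def pvLoopA (t : List Char) : Nat → List Char → Int → Int
  | 0, _, ans => ans
  | fuel + 1, l, ans =>
    match pvPassA l t with
    | some l' => pvLoopA t fuel l' (ans + 1)
    | none => ans

def rearrangeCharacters (s : String) (target : String) : Int :=
  pvLoopA target.toList (s.toList.length + 1) s.toList 0

-- ===== PORT B =====
-- B: min(s.count(c) // target.count(c) for c in set(target)).  min without a key is
-- iteration-order independent, so mapping over set(target)'s element list is exact;
-- Python's min raises on an empty sequence — `.getD 0` only totalises that case,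
-- which Pre_ excludes.
def rearrangeCharacters_alt (s : String) (target : String) : Int :=
  (PySem.List.min?
      ((PySem.Set.ofList target.toList).map
        (fun c => PySem.Int.floordiv ((PySem.Str.count s (String.ofList [c]) : Int))
                                     ((PySem.Str.count target (String.ofList [c]) : Int))))
      (fun x => x)).getD 0

-- ===== PRECONDITION & SPEC =====
-- Pre_ excludes only target = "", where A never returns (its while-loop runs forever)
-- and B raises ValueError (min of an empty sequence).
def Pre_rearrangeCharacters (s : String) (target : String) : Prop := target ≠ ""
instance (s : String) (target : String) : Decidable (Pre_rearrangeCharacters s target) := by unfold Pre_rearrangeCharacters; infer_instance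
def pvWitness_rearrangeCharacters : String × String := ("abcbcab", "abc")

def Spec_rearrangeCharacters (s : String) (target : String) (out : Int) : Prop := out = rearrangeCharacters_alt s target
instance (s : String) (target : String) (out : Int) : Decidable (Spec_rearrangeCharacters s target out) := by unfold Spec_rearrangeCharacters; infer_instance

-- ===== CLAIM (what is proved, stated in full; the proofs are below) =====
def Claim_equal_rearrangeCharacters : Prop := ∀ (s : String) (target : String), Dom_rearrangeCharacters s target → Pre_rearrangeCharacters s target → Spec_rearrangeCharacters s target (rearrangeCharacters s target)

-- ===== LEMMAS AND PROOFS =====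

-- Python's str.count with a one-character needle is character count.
lemma pvCountGoSingle (c : Char) : ∀ (l : List Char) (fuel acc : Nat), l.length ≤ fuel →
    PySem.Chars.count.go [c] fuel l acc = acc + l.count c := by
  intro l
  induction l with
  | nil => intro fuel acc h; cases fuel <;> simp [PySem.Chars.count.go]
  | cons x t ih =>
    intro fuel acc h
    cases fuel with
    | zero => simp at h
    | succ f =>
      simp only [PySem.Chars.count.go, List.isPrefixOf]
      by_cases hx : c = x
      · subst hx
        simp [ih f (acc + 1) (by simpa using h)]
        omega
      · simp [beq_iff_eq, Ne.symm hx, ih f acc (by simpa using h), hx]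

lemma pvCountSingle (cs : List Char) (c : Char) :
    PySem.Chars.count cs [c] = cs.count c := by
  simp [PySem.Chars.count, pvCountGoSingle c cs cs.length 0 le_rfl]

-- (a - b) / b = a / b - 1 for 0 < b ≤ a
lemma pvSubDiv (a b : Nat) (hb : 0 < b) (hba : b ≤ a) : (a - b) / b = a / b - 1 := by
  have h : a / b = (a - b) / b + 1 := by
    conv_lhs => rw [← Nat.sub_add_cancel hba]
    exact Nat.add_div_right _ hb
  rw [h, Nat.add_sub_cancel]

-- A successful pass requires every multiplicity of t in l, and subtracts it.
lemma pvPassA_counts : ∀ (t l l' : List Char), pvPassA l t = some l' →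
    (∀ c, t.count c ≤ l.count c) ∧ (∀ c, l'.count c = l.count c - t.count c) := by
  intro t
  induction t with
  | nil =>
    intro l l' h
    simp only [pvPassA, Option.some.injEq] at h
    subst h
    simp
  | cons c rest ih =>
    intro l l' h
    by_cases hc : c ∈ l
    · simp only [pvPassA, List.contains_iff_mem, hc, if_pos] at h
      obtain ⟨h1, h2⟩ := ih (l.erase c) l' h
      have hpos : 0 < l.count c := List.count_pos_iff.mpr hc
      constructor
      · intro c'
        have h' := h1 c'
        by_cases e : c' = c
        · subst e
          rw [List.count_erase_self] at h'
          simp only [List.count_cons]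
          simp
          omega
        · rw [List.count_erase_of_ne e] at h'
          simp [Ne.symm e]
          omega
      · intro c'
        have h' := h2 c'
        by_cases e : c' = c
        · subst e
          rw [List.count_erase_self] at h'
          simp
          omega
        · rw [List.count_erase_of_ne e] at h'
          simp [Ne.symm e]
          omega
    · simp only [pvPassA, List.contains_iff_mem, hc, if_false] at h
      exact absurd h (by simp)

-- If l has every multiplicity of t, the pass succeeds.
lemma pvPassA_some : ∀ (t l : List Char), (∀ c, t.count c ≤ l.count c) →
    ∃ l', pvPassA l t = some l' := by
  intro t
  induction t with
  | nil => intro l _; exact ⟨l, rfl⟩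
  | cons c rest ih =>
    intro l h
    have hc : c ∈ l := by
      have := h c
      simp at this
      exact List.count_pos_iff.mp (by omega)
    have h' : ∀ c', rest.count c' ≤ (l.erase c).count c' := by
      intro c'
      have := h c'
      by_cases e : c' = c
      · subst e
        rw [List.count_erase_self]
        simp at this
        omega
      · rw [List.count_erase_of_ne e]
        simp [Ne.symm e] at this
        omega
    obtain ⟨l', hl'⟩ := ih (l.erase c) h'
    exact ⟨l', by simp [pvPassA, hc, hl']⟩

-- The while-loop returns ans + m where m is the min of the per-character floor-divisions.
lemma pvLoopA_eq (T : List Char) (fuel : Nat) : ∀ (l : List Char) (ans : Int) (m : Nat),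
    (∃ c ∈ T, m = l.count c / T.count c) →
    (∀ c ∈ T, m ≤ l.count c / T.count c) →
    m < fuel →
    pvLoopA T fuel l ans = ans + m := by
  induction fuel with
  | zero => intro l ans m _ _ hlt; omega
  | succ f ih =>
    intro l ans m hex hall hlt
    obtain ⟨c0, hc0T, hc0⟩ := hex
    by_cases hge : ∀ c, T.count c ≤ l.count c
    · obtain ⟨l', hpass, hcnt⟩ :=
        (fun h => ⟨(pvPassA_some T l h).choose, (pvPassA_some T l h).choose_spec,
          (pvPassA_counts T l _ (pvPassA_some T l h).choose_spec).2⟩ :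
          (∀ c, T.count c ≤ l.count c) →
          ∃ l', pvPassA l T = some l' ∧ ∀ c, l'.count c = l.count c - T.count c) hge
      have hTpos : ∀ c ∈ T, 0 < T.count c := fun c hc => List.count_pos_iff.mpr hc
      have hm1 : 1 ≤ m := by
        rw [hc0]
        exact (Nat.one_le_div_iff (hTpos c0 hc0T)).mpr (hge c0)
      simp only [pvLoopA, hpass]
      have hstep : ∀ c ∈ T, l'.count c / T.count c = l.count c / T.count c - 1 := by
        intro c hc
        rw [hcnt c, pvSubDiv _ _ (hTpos c hc) (hge c)]
      rw [ih l' (ans + 1) (m - 1)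
        ⟨c0, hc0T, by rw [hstep c0 hc0T, ← hc0]⟩
        (fun c hc => by rw [hstep c hc]; have := hall c hc; omega)
        (by omega)]
      have : ((m - 1 : Nat) : Int) = (m : Int) - 1 := by omega
      rw [this]; ring
    · push Not at hge
      obtain ⟨c, hclt⟩ := hge
      have hcT : c ∈ T := List.count_pos_iff.mp (by omega)
      have hm0 : m = 0 := by
        have := hall c hcT
        rw [Nat.div_eq_of_lt hclt] at this
        omega
      have hnone : pvPassA l T = none := by
        cases hp : pvPassA l T with
        | none => rfl
        | some l' =>
          have := (pvPassA_counts T l l' hp).1 c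
          omega
      simp [pvLoopA, hnone, hm0]

-- B's value, written over List.count and Nat division.
lemma pvAltEq (s target : String) :
    rearrangeCharacters_alt s target =
      (PySem.List.min?
        ((PySem.Set.ofList target.toList).map
          (fun c => ((s.toList.count c / target.toList.count c : Nat) : Int)))
        (fun x => x)).getD 0 := by
  unfold rearrangeCharacters_alt
  have hf : (fun c => PySem.Int.floordiv ((PySem.Str.count s (String.ofList [c]) : Int))
                                         ((PySem.Str.count target (String.ofList [c]) : Int)))
      = (fun c => ((s.toList.count c / target.toList.count c : Nat) : Int)) := by
    funext c
    simp [PySem.Str.count_eq, pvCountSingle]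
  rw [hf]

-- ===== VERDICT (by name: the statement is the Claim_ definition above) =====
theorem rearrangeCharacters_spec : Claim_equal_rearrangeCharacters := by
  intro s target _ hpre
  unfold Spec_rearrangeCharacters
  have hT : target.toList ≠ [] := fun h => hpre (String.toList_eq_nil_iff.mp h)
  -- characterise B's value as a Nat m that is attained and a lower bound
  rw [pvAltEq]
  set f : Char → Int := fun c => ((s.toList.count c / target.toList.count c : Nat) : Int) with hfdef
  have hne : (PySem.Set.ofList target.toList).map f ≠ [] := by
    obtain ⟨c, hc⟩ := List.exists_mem_of_ne_nil _ hT
    intro h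
    have hcmem : f c ∈ (PySem.Set.ofList target.toList).map f :=
      List.mem_map.mpr ⟨c, (PySem.Set.mem_ofList _ _).mpr hc, rfl⟩
    rw [h] at hcmem
    simp at hcmem
  cases hmin : PySem.List.min? ((PySem.Set.ofList target.toList).map f) (fun x => x) with
  | none => exact absurd ((PySem.List.min?_eq_none_iff _ _).mp hmin) hne
  | some v =>
    obtain ⟨c1, hc1set, hc1v⟩ := List.mem_map.mp (PySem.List.min?_mem hmin)
    have hc1T : c1 ∈ target.toList := (PySem.Set.mem_ofList _ _).mp hc1set
    have hlow : ∀ c ∈ target.toList, v ≤ f c := by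
      intro c hc
      exact PySem.List.min?_isMin hmin (f c)
        (List.mem_map.mpr ⟨c, (PySem.Set.mem_ofList _ _).mpr hc, rfl⟩)
    -- m := the Nat behind v
    set m : Nat := s.toList.count c1 / target.toList.count c1 with hmdef
    have hvm : v = (m : Int) := hc1v.symm
    have hmlow : ∀ c ∈ target.toList, m ≤ s.toList.count c / target.toList.count c := by
      intro c hc
      have h2 : (m : Int) ≤ ((s.toList.count c / target.toList.count c : Nat) : Int) := by
        simpa [hvm, hfdef] using hlow c hc
      exact_mod_cast h2
    have hmfuel : m < s.toList.length + 1 := by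
      have h1 : m ≤ s.toList.count c1 := Nat.div_le_self _ _
      have h2 : s.toList.count c1 ≤ s.toList.length := List.count_le_length
      omega
    unfold rearrangeCharacters
    rw [pvLoopA_eq target.toList (s.toList.length + 1) s.toList 0 m
      ⟨c1, hc1T, rfl⟩ hmlow hmfuel]
    simp [hvm]
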